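-- pv_equiv track=rewrite | github.com/Soul-Research-Labs/soul-protocol | scripts/check_natspec_coverage.py | strip_comments
-- ===== SOURCE A (Python) =====
-- def strip_comments(content: str) -> str:
--     """
--     Strip all comments from Solidity source, replacing them with whitespace
--     of the same length so that character offsets remain valid.
--     """
--     result = list(content)
--     i = 0
--     while i < len(content) - 1:
--         # Single-line comment
--         if content[i] == '/' and content[i + 1] == '/':
--             j = i
--             while j < len(content) and content[j] != '\n':
--                 result[j] = ' '
--                 j += 1
--             i = j
--         # Multi-line / NatSpec comment
--         elif content[i] == '/' and content[i + 1] == '*':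
--             j = i + 2
--             while j < len(content) - 1:
--                 if content[j] == '*' and content[j + 1] == '/':
--                     j += 2
--                     break
--                 j += 1
--             else:
--                 j = len(content)
--             for k in range(i, j):
--                 if content[k] != '\n':
--                     result[k] = ' '
--             i = j
--         # Skip string literals
--         elif content[i] == '"':
--             i += 1
--             while i < len(content) and content[i] != '"':
--                 if content[i] == '\\':
--                     i += 1
--                 i += 1
--             i += 1
--         else:
--             i += 1
--     return ''.join(result)
-- ===== SOURCE B (Python) =====
-- def strip_comments(content: str) -> str:
--     """Single-pass finite-state machine: NORMAL/LINE/BLOCK/STRING states,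
--     emitting output characters as it goes (spaces for comment bytes,
--     newlines kept so offsets stay valid)."""
--     n = len(content)
--     out = []
--     state = 0  # 0 normal, 1 line comment, 2 block comment, 3 string literal
--     escaped = False
--     i = 0
--     while i < n:
--         c = content[i]
--         if state == 0:
--             if c == '/' and i + 1 < n and content[i + 1] == '/':
--                 out.append('  ')
--                 i += 2
--                 state = 1
--             elif c == '/' and i + 1 < n and content[i + 1] == '*':
--                 out.append('  ')
--                 i += 2
--                 state = 2
--             else:
--                 out.append(c)
--                 i += 1
--                 if c == '"':
--                     state = 3
--         elif state == 1:
--             if c == '\n':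
--                 out.append(c)
--                 state = 0
--             else:
--                 out.append(' ')
--             i += 1
--         elif state == 2:
--             if c == '*' and i + 1 < n and content[i + 1] == '/':
--                 out.append('  ')
--                 i += 2
--                 state = 0
--             else:
--                 out.append(c if c == '\n' else ' ')
--                 i += 1
--         else:  # string literal
--             out.append(c)
--             if escaped:
--                 escaped = False
--             elif c == '\\':
--                 escaped = True
--             elif c == '"':
--                 state = 0
--             i += 1
--     return ''.join(out)
-- ===== Notes on version B (the rewrite author's own statement) =====
-- stated objective: alternative
-- what changed: Replaced A's nested-scan loops (outer index loop with inner sub-loops that re-scan and overwrite a pre-copied char list) by a single-pass four-state finite-state machine (NORMAL/LINE/BLOCK/STRING with an escape flag) that emits each output character exactly once.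
import Mathlib
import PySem

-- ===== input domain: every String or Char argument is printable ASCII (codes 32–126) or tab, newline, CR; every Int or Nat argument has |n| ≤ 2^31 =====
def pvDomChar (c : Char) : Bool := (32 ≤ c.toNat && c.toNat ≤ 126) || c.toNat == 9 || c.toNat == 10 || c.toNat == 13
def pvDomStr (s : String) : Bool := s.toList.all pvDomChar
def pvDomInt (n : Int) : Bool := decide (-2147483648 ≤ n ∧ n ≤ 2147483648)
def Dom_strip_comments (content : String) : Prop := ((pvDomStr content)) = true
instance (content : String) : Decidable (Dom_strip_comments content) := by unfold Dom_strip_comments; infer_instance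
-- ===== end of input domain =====

-- B replaces A's nested index-scanning loops (which overwrite a pre-copied char list)
-- by a single-pass four-state finite-state machine emitting each output char once
-- ('alternative': same O(n) cost, different structure).

-- tiny termination facts (kept top-level so the recursive definitions' proofs stay small)
theorem pvDecOne (L i : Nat) (h : i < L) : L - (i + 1) < L - i := by omega
theorem pvDecTwo (L i : Nat) (h : i < L) : L - (i + 2) < L - i := by omega
theorem pvDecLt (L a b : Nat) (hb : b < L) (hab : b < a) : L - a < L - b := by omega
theorem pvLtTwo (i : Nat) : i < i + 2 := by omega

-- ===== PORT A =====
-- inner loop of the single-line-comment branch: j = i; while j < len and content[j] != '\n': result[j] = ' '; j += 1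
def aLine (cs res : List Char) (j : Nat) : List Char × Nat :=
  if h : j < cs.length ∧ cs.getD j ' ' ≠ '\n' then aLine cs (res.set j ' ') (j + 1) else (res, j)
termination_by cs.length - j
decreasing_by exact pvDecOne _ _ h.1

-- inner scan of the block-comment branch: while j < len-1: if '*/' at j: j += 2; break; j += 1; else: j = len
def aBlockScan (cs : List Char) (j : Nat) : Nat :=
  if j + 1 < cs.length then
    if cs.getD j ' ' = '*' ∧ cs.getD (j + 1) ' ' = '/' then j + 2 else aBlockScan cs (j + 1)
  else cs.length
termination_by cs.length - j
decreasing_by exact pvDecOne _ _ (Nat.lt_of_succ_lt (by assumption))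

-- for k in range(i, j): if content[k] != '\n': result[k] = ' '
def spaceRange (cs res : List Char) (k j : Nat) : List Char :=
  if k < j then spaceRange cs (if cs.getD k ' ' = '\n' then res else res.set k ' ') (k + 1) j else res
termination_by j - k
decreasing_by exact pvDecOne _ _ (by assumption)

-- string-literal skip: i += 1 already done by caller; while i < len and content[i] != '"': if '\\': i += 1; i += 1; then i += 1
def aStringSkip (cs : List Char) (i : Nat) : Nat :=
  if h : i < cs.length ∧ cs.getD i ' ' ≠ '"' then
    aStringSkip cs (if cs.getD i ' ' = '\\' then i + 2 else i + 1)
  else i + 1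
termination_by cs.length - i
decreasing_by
  split
  · exact pvDecTwo _ _ h.1
  · exact pvDecOne _ _ h.1

-- termination facts the outer loop's recursion needs (cited in decreasing_by)
theorem aLine_snd_ge (cs res : List Char) (j : Nat) : j ≤ (aLine cs res j).2 := by
  fun_induction aLine with
  | case1 res j h ih => omega
  | case2 res j h => simp

theorem aBlockScan_ge (cs : List Char) (j : Nat) (h : j ≤ cs.length) : j ≤ aBlockScan cs j := by
  fun_induction aBlockScan with
  | case1 j h1 h2 => omega
  | case2 j h1 h2 ih => omega
  | case3 j h1 => omega

theorem aStringSkip_ge (cs : List Char) (i : Nat) : i + 1 ≤ aStringSkip cs i := by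
  rw [aStringSkip]
  split
  · rename_i h
    split
    · have := aStringSkip_ge cs (i + 2); omega
    · have := aStringSkip_ge cs (i + 1); omega
  · omega
termination_by cs.length - i
decreasing_by all_goals omega

theorem aLine_snd_gt (cs res : List Char) (j : Nat) (h1 : j < cs.length)
    (h2 : cs.getD j ' ' ≠ '\n') : j < (aLine cs res j).2 := by
  rw [aLine]
  rw [dif_pos ⟨h1, h2⟩]
  have := aLine_snd_ge cs (res.set j ' ') (j + 1)
  omega

-- outer loop: while i < len(content) - 1
def aMain (cs res : List Char) (i : Nat) : List Char :=
  if h : i + 1 < cs.length then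
    if h2 : cs.getD i ' ' = '/' ∧ cs.getD (i + 1) ' ' = '/' then
      aMain cs (aLine cs res i).1 (aLine cs res i).2
    else if cs.getD i ' ' = '/' ∧ cs.getD (i + 1) ' ' = '*' then
      aMain cs (spaceRange cs res i (aBlockScan cs (i + 2))) (aBlockScan cs (i + 2))
    else if cs.getD i ' ' = '"' then
      aMain cs res (aStringSkip cs (i + 1))
    else
      aMain cs res (i + 1)
  else res
termination_by cs.length - i
decreasing_by
  · exact pvDecLt _ _ _ (Nat.lt_of_succ_lt h)
      (aLine_snd_gt cs res i (Nat.lt_of_succ_lt h) (by rw [h2.1]; decide))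
  · exact pvDecLt _ _ _ (Nat.lt_of_succ_lt h)
      (Nat.lt_of_lt_of_le (pvLtTwo i) (aBlockScan_ge cs (i + 2) h))
  · exact pvDecLt _ _ _ (Nat.lt_of_succ_lt h)
      (Nat.lt_of_lt_of_le (pvLtTwo i) (aStringSkip_ge cs (i + 1)))
  · exact pvDecOne _ _ (Nat.lt_of_succ_lt h)

def strip_comments (content : String) : String :=
  String.mk (aMain content.toList content.toList 0)

-- ===== PORT B =====
-- single-pass FSM: state 0 = normal, 1 = line comment, 2 = block comment, ≥3 = string literal
def bRun (cs : List Char) (i : Nat) (st : Nat) (esc : Bool) : List Char :=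
  if h : i < cs.length then
    let c := cs.getD i ' '
    if st = 0 then
      if c = '/' ∧ i + 1 < cs.length ∧ cs.getD (i + 1) ' ' = '/' then
        ' ' :: ' ' :: bRun cs (i + 2) 1 esc
      else if c = '/' ∧ i + 1 < cs.length ∧ cs.getD (i + 1) ' ' = '*' then
        ' ' :: ' ' :: bRun cs (i + 2) 2 esc
      else
        c :: bRun cs (i + 1) (if c = '"' then 3 else 0) esc
    else if st = 1 then
      if c = '\n' then c :: bRun cs (i + 1) 0 esc else ' ' :: bRun cs (i + 1) 1 esc
    else if st = 2 then
      if c = '*' ∧ i + 1 < cs.length ∧ cs.getD (i + 1) ' ' = '/' then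
        ' ' :: ' ' :: bRun cs (i + 2) 0 esc
      else
        (if c = '\n' then c else ' ') :: bRun cs (i + 1) 2 esc
    else
      c :: (if esc then bRun cs (i + 1) st false
            else if c = '\\' then bRun cs (i + 1) st true
            else if c = '"' then bRun cs (i + 1) 0 esc
            else bRun cs (i + 1) st esc)
  else []
termination_by cs.length - i
decreasing_by all_goals first
  | exact pvDecTwo _ _ h
  | exact pvDecOne _ _ h

def strip_comments_alt (content : String) : String :=
  String.mk (bRun content.toList 0 0 false)

-- ===== PRECONDITION & SPEC =====
def Spec_strip_comments (content : String) (out : String) : Prop := out = strip_comments_alt content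
instance (content : String) (out : String) : Decidable (Spec_strip_comments content out) := by unfold Spec_strip_comments; infer_instance

-- ===== CLAIM (what is proved, stated in full; the proofs are below) =====
def Claim_equal_strip_comments : Prop := ∀ (content : String), Dom_strip_comments content → Spec_strip_comments content (strip_comments content)

-- ===== LEMMAS AND PROOFS =====

theorem take_set_le (l : List Char) (n m : Nat) (a : Char) (h : m ≤ n) :
    (l.set n a).take m = l.take m := by
  apply List.ext_getElem?
  intro k
  rw [List.getElem?_take, List.getElem?_take]
  split
  · rw [List.getElem?_set_ne (by omega)]
  · rfl

theorem set_take_snoc (l : List Char) (i : Nat) (c : Char) (hi : i < l.length) :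
    (l.set i c).take (i + 1) = l.take i ++ [c] := by
  rw [List.take_add_one, take_set_le l i i c (Nat.le_refl i)]
  congr 1
  rw [List.getElem?_set_self (by omega)]
  rfl

theorem set_drop_succ (l : List Char) (i : Nat) (c : Char) :
    (l.set i c).drop (i + 1) = l.drop (i + 1) := by
  rw [List.drop_set_of_lt]
  omega

theorem drop_mono_succ {res cs : List Char} {i : Nat} (h : res.drop i = cs.drop i) :
    res.drop (i + 1) = cs.drop (i + 1) := by
  have h2 := congrArg (List.drop 1) h
  simpa [List.drop_drop, Nat.add_comm] using h2

theorem getElem_eq_of_drop {res cs : List Char} {i : Nat} (hl : res.length = cs.length)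
    (h : res.drop i = cs.drop i) (hi : i < cs.length) :
    res[i]'(by omega) = cs[i]'hi := by
  have h1 : res.drop i = res[i]'(by omega) :: res.drop (i + 1) := List.drop_eq_getElem_cons (by omega)
  have h2 : cs.drop i = cs[i]'hi :: cs.drop (i + 1) := List.drop_eq_getElem_cons hi
  rw [h1, h2] at h
  exact (List.cons_eq_cons.mp h).1

theorem take_snoc_of_drop {res cs : List Char} {i : Nat} (hl : res.length = cs.length)
    (h : res.drop i = cs.drop i) (hi : i < cs.length) :
    res.take (i + 1) = res.take i ++ [cs.getD i ' '] := by
  rw [List.take_add_one]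
  congr 1
  rw [List.getElem?_eq_getElem (by omega : i < res.length)]
  have := getElem_eq_of_drop hl h hi
  simp [this, List.getD_eq_getElem?_getD, List.getElem?_eq_getElem, hi]

-- how A's remaining computation reads when B's FSM is at position i in state st (esc = escape flag)
def Acorr (cs res : List Char) (i : Nat) (st : Nat) (esc : Bool) : List Char :=
  if st = 0 then aMain cs res i
  else if st = 1 then aMain cs (aLine cs res i).1 (aLine cs res i).2
  else if st = 2 then aMain cs (spaceRange cs res i (aBlockScan cs i)) (aBlockScan cs i)
  else aMain cs res (aStringSkip cs (if esc then i + 1 else i))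

theorem mega (cs : List Char) (m : Nat) : ∀ (i st : Nat) (esc : Bool) (res : List Char),
    2 * (cs.length + 1 - i) + (if st = 1 then 1 else 0) < m →
    res.length = cs.length → res.drop i = cs.drop i →
    (esc = true → ¬(st = 0 ∨ st = 1 ∨ st = 2)) →
    Acorr cs res i st esc = res.take i ++ bRun cs i st esc := by
  induction m with
  | zero => intro i st esc res hm _ _ _; exact absurd hm (Nat.not_lt_zero _)
  | succ m ih =>
    intro i st esc res hm hlen hdrop hesc
    by_cases hi : i < cs.length
    case neg =>
      -- past the end: B emits nothing, all of A's remaining loops stop at once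
      rw [bRun, dif_neg hi, List.append_nil, List.take_of_length_le (by omega)]
      obtain _ | _ | _ | st := st
      · have hA : Acorr cs res i 0 esc = aMain cs res i := by simp [Acorr]
        rw [hA, aMain, dif_neg (by omega)]
      · have e1 : aLine cs res i = (res, i) := by rw [aLine, dif_neg (fun h => hi h.1)]
        have hA : Acorr cs res i 1 esc = aMain cs (aLine cs res i).1 (aLine cs res i).2 := by
          simp [Acorr]
        rw [hA, e1]
        show aMain cs res i = res
        rw [aMain, dif_neg (by omega)]
      · have eJ : aBlockScan cs i = cs.length := by rw [aBlockScan, if_neg (by omega)]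
        have eS : spaceRange cs res i cs.length = res := by rw [spaceRange, if_neg (by omega)]
        have hA : Acorr cs res i 2 esc
            = aMain cs (spaceRange cs res i (aBlockScan cs i)) (aBlockScan cs i) := by
          simp [Acorr]
        rw [hA, eJ, eS, aMain, dif_neg (by omega)]
      · have h0 : st + 3 ≠ 0 := by omega
        have h1 : st + 3 ≠ 1 := by omega
        have h2 : st + 3 ≠ 2 := by omega
        cases esc with
        | false =>
          have hA : Acorr cs res i (st + 3) false = aMain cs res (aStringSkip cs i) := by
            simp [Acorr, h0, h1, h2]
          have eS : aStringSkip cs i = i + 1 := by rw [aStringSkip, dif_neg (fun h => hi h.1)]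
          rw [hA, eS, aMain, dif_neg (by omega)]
        | true =>
          have hA : Acorr cs res i (st + 3) true = aMain cs res (aStringSkip cs (i + 1)) := by
            simp [Acorr, h0, h1, h2]
          have eS : aStringSkip cs (i + 1) = i + 2 := by
            rw [aStringSkip, dif_neg (fun h => absurd h.1 (by omega))]
          rw [hA, eS, aMain, dif_neg (by omega)]
    case pos =>
    obtain _ | _ | _ | st := st
    -- ===== state 0 : NORMAL =====
    · have he : esc = false := by
        cases esc with
        | false => rfl
        | true => exact (hesc rfl (Or.inl rfl)).elim
      subst he
      have hm' : 2 * (cs.length + 1 - i) < m + 1 := by simpa using hm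
      have hA : Acorr cs res i 0 false = aMain cs res i := by simp [Acorr]
      rw [hA]
      by_cases hi1 : i + 1 < cs.length
      · by_cases hsl : cs.getD i ' ' = '/' ∧ cs.getD (i + 1) ' ' = '/'
        · -- start of a '//' comment
          have e1 : aLine cs res i = aLine cs (res.set i ' ') (i + 1) := by
            rw [aLine, dif_pos ⟨hi, by rw [hsl.1]; decide⟩]
          have e2 : aLine cs (res.set i ' ') (i + 1)
              = aLine cs ((res.set i ' ').set (i + 1) ' ') (i + 2) := by
            rw [aLine, dif_pos ⟨hi1, by rw [hsl.2]; decide⟩]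
          have hlen2 : ((res.set i ' ').set (i + 1) ' ').length = cs.length := by simp [hlen]
          have hdrop2 : ((res.set i ' ').set (i + 1) ' ').drop (i + 2) = cs.drop (i + 2) := by
            have d1 : ((res.set i ' ').set (i + 1) ' ').drop (i + 2) = (res.set i ' ').drop (i + 2) := by
              rw [List.drop_set_of_lt]; omega
            have d2 : (res.set i ' ').drop (i + 2) = res.drop (i + 2) := by
              rw [List.drop_set_of_lt]; omega
            rw [d1, d2]; exact drop_mono_succ (drop_mono_succ hdrop)
          have ih' := ih (i + 2) 1 false ((res.set i ' ').set (i + 1) ' ')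
            (by simp; omega) hlen2 hdrop2 (by simp)
          have ih2 : aMain cs (aLine cs ((res.set i ' ').set (i + 1) ' ') (i + 2)).1
              (aLine cs ((res.set i ' ').set (i + 1) ' ') (i + 2)).2
              = ((res.set i ' ').set (i + 1) ' ').take (i + 2) ++ bRun cs (i + 2) 1 false := by
            simpa [Acorr] using ih'
          rw [aMain, dif_pos hi1, dif_pos hsl, e1, e2, ih2]
          have t2 : ((res.set i ' ').set (i + 1) ' ').take (i + 2)
              = (res.set i ' ').take (i + 1) ++ [' '] :=
            set_take_snoc _ (i + 1) ' ' (by simp [hlen]; omega)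
          have t1 : (res.set i ' ').take (i + 1) = res.take i ++ [' '] :=
            set_take_snoc _ i ' ' (by omega)
          have b1 : bRun cs i 0 false = ' ' :: ' ' :: bRun cs (i + 2) 1 false := by
            rw [bRun, dif_pos hi, if_pos rfl, if_pos ⟨hsl.1, hi1, hsl.2⟩]
          rw [t2, t1, b1]
          simp
        · by_cases hbl : cs.getD i ' ' = '/' ∧ cs.getD (i + 1) ' ' = '*'
          · -- start of a '/*' comment
            have hJ := aBlockScan_ge cs (i + 2) (by omega)
            have s1 : spaceRange cs res i (aBlockScan cs (i + 2))
                = spaceRange cs (res.set i ' ') (i + 1) (aBlockScan cs (i + 2)) := by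
              rw [spaceRange, if_pos (by omega), if_neg (by rw [hbl.1]; decide)]
            have s2 : spaceRange cs (res.set i ' ') (i + 1) (aBlockScan cs (i + 2))
                = spaceRange cs ((res.set i ' ').set (i + 1) ' ') (i + 2) (aBlockScan cs (i + 2)) := by
              rw [spaceRange, if_pos (by omega), if_neg (by rw [hbl.2]; decide)]
            have hlen2 : ((res.set i ' ').set (i + 1) ' ').length = cs.length := by simp [hlen]
            have hdrop2 : ((res.set i ' ').set (i + 1) ' ').drop (i + 2) = cs.drop (i + 2) := by
              have d1 : ((res.set i ' ').set (i + 1) ' ').drop (i + 2) = (res.set i ' ').drop (i + 2) := by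
                rw [List.drop_set_of_lt]; omega
              have d2 : (res.set i ' ').drop (i + 2) = res.drop (i + 2) := by
                rw [List.drop_set_of_lt]; omega
              rw [d1, d2]; exact drop_mono_succ (drop_mono_succ hdrop)
            have ih' := ih (i + 2) 2 false ((res.set i ' ').set (i + 1) ' ')
              (by simp; omega) hlen2 hdrop2 (by simp)
            have ih2 : aMain cs (spaceRange cs ((res.set i ' ').set (i + 1) ' ') (i + 2) (aBlockScan cs (i + 2)))
                (aBlockScan cs (i + 2))
                = ((res.set i ' ').set (i + 1) ' ').take (i + 2) ++ bRun cs (i + 2) 2 false := by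
              simpa [Acorr] using ih'
            rw [aMain, dif_pos hi1, dif_neg hsl, if_pos hbl, s1, s2, ih2]
            have t2 : ((res.set i ' ').set (i + 1) ' ').take (i + 2)
                = (res.set i ' ').take (i + 1) ++ [' '] :=
              set_take_snoc _ (i + 1) ' ' (by simp [hlen]; omega)
            have t1 : (res.set i ' ').take (i + 1) = res.take i ++ [' '] :=
              set_take_snoc _ i ' ' (by omega)
            have b1 : bRun cs i 0 false = ' ' :: ' ' :: bRun cs (i + 2) 2 false := by
              have n1 : ¬(cs.getD i ' ' = '/' ∧ i + 1 < cs.length ∧ cs.getD (i + 1) ' ' = '/') := by intro h; rw [hbl.2] at h; exact absurd h.2.2 (by decide)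
              rw [bRun, dif_pos hi, if_pos rfl, if_neg n1, if_pos ⟨hbl.1, hi1, hbl.2⟩]
            rw [t2, t1, b1]
            simp
          · by_cases hq : cs.getD i ' ' = '"'
            · -- string literal opens
              have ih' := ih (i + 1) 3 false res (by simp; omega) hlen (drop_mono_succ hdrop) (by simp)
              have ih2 : aMain cs res (aStringSkip cs (i + 1))
                  = res.take (i + 1) ++ bRun cs (i + 1) 3 false := by
                simpa [Acorr] using ih'
              rw [aMain, dif_pos hi1, dif_neg hsl, if_neg hbl, if_pos hq, ih2,
                take_snoc_of_drop hlen hdrop hi]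
              have b1 : bRun cs i 0 false = cs.getD i ' ' :: bRun cs (i + 1) 3 false := by
                have hns : cs.getD i ' ' ≠ '/' := by rw [hq]; decide
                have n1 : ¬(cs.getD i ' ' = '/' ∧ i + 1 < cs.length ∧ cs.getD (i + 1) ' ' = '/') := fun h => hns h.1
                have n2 : ¬(cs.getD i ' ' = '/' ∧ i + 1 < cs.length ∧ cs.getD (i + 1) ' ' = '*') := fun h => hns h.1
                rw [bRun, dif_pos hi, if_pos rfl, if_neg n1, if_neg n2, if_pos hq]
              rw [b1]
              simp
            · -- plain character
              have ih' := ih (i + 1) 0 false res (by simp; omega) hlen (drop_mono_succ hdrop) (by simp)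
              have ih2 : aMain cs res (i + 1) = res.take (i + 1) ++ bRun cs (i + 1) 0 false := by
                simpa [Acorr] using ih'
              rw [aMain, dif_pos hi1, dif_neg hsl, if_neg hbl, if_neg hq, ih2,
                take_snoc_of_drop hlen hdrop hi]
              have b1 : bRun cs i 0 false = cs.getD i ' ' :: bRun cs (i + 1) 0 false := by
                have n1 : ¬(cs.getD i ' ' = '/' ∧ i + 1 < cs.length ∧ cs.getD (i + 1) ' ' = '/') :=
                  fun h => hsl ⟨h.1, h.2.2⟩
                have n2 : ¬(cs.getD i ' ' = '/' ∧ i + 1 < cs.length ∧ cs.getD (i + 1) ' ' = '*') :=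
                  fun h => hbl ⟨h.1, h.2.2⟩
                rw [bRun, dif_pos hi, if_pos rfl, if_neg n1, if_neg n2, if_neg hq]
              rw [b1]
              simp
      · -- i is the last index: A's outer loop has already stopped, B emits the char unchanged
        rw [aMain, dif_neg hi1]
        have hstop : bRun cs (i + 1) (if cs.getD i ' ' = '"' then 3 else 0) false = [] := by
          rw [bRun, dif_neg (by omega)]
        have b1 : bRun cs i 0 false = [cs.getD i ' '] := by
          rw [bRun, dif_pos hi]
          have n1 : ¬(cs.getD i ' ' = '/' ∧ i + 1 < cs.length ∧ cs.getD (i + 1) ' ' = '/') :=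
            fun h => hi1 h.2.1
          have n2 : ¬(cs.getD i ' ' = '/' ∧ i + 1 < cs.length ∧ cs.getD (i + 1) ' ' = '*') :=
            fun h => hi1 h.2.1
          rw [if_pos rfl, if_neg n1, if_neg n2, hstop]
        rw [b1, ← take_snoc_of_drop hlen hdrop hi, List.take_of_length_le (by omega)]
    -- ===== state 1 : LINE COMMENT =====
    · have he : esc = false := by
        cases esc with
        | false => rfl
        | true => exact (hesc rfl (Or.inr (Or.inl rfl))).elim
      subst he
      have hm' : 2 * (cs.length + 1 - i) + 1 < m + 1 := by simpa using hm
      have hA : Acorr cs res i 1 false = aMain cs (aLine cs res i).1 (aLine cs res i).2 := by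
        simp [Acorr]
      rw [hA]
      by_cases hnl : cs.getD i ' ' = '\n'
      · -- newline ends the line comment; both sides then behave as NORMAL at the same i
        have e1 : aLine cs res i = (res, i) := by rw [aLine, dif_neg (fun h => h.2 hnl)]
        rw [e1]
        show aMain cs res i = res.take i ++ bRun cs i 1 false
        have ih' := ih i 0 false res (by simp; omega) hlen hdrop (by simp)
        have ih2 : aMain cs res i = res.take i ++ bRun cs i 0 false := by simpa [Acorr] using ih'
        rw [ih2]
        congr 1
        have hns : cs.getD i ' ' ≠ '/' := by rw [hnl]; decide
        have hnq : cs.getD i ' ' ≠ '"' := by rw [hnl]; decide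
        have b0 : bRun cs i 0 false = cs.getD i ' ' :: bRun cs (i + 1) 0 false := by
          have n1 : ¬(cs.getD i ' ' = '/' ∧ i + 1 < cs.length ∧ cs.getD (i + 1) ' ' = '/') :=
            fun h => hns h.1
          have n2 : ¬(cs.getD i ' ' = '/' ∧ i + 1 < cs.length ∧ cs.getD (i + 1) ' ' = '*') :=
            fun h => hns h.1
          rw [bRun, dif_pos hi, if_pos rfl, if_neg n1, if_neg n2, if_neg hnq]
        have b1 : bRun cs i 1 false = cs.getD i ' ' :: bRun cs (i + 1) 0 false := by
          rw [bRun, dif_pos hi, if_neg (by decide : ¬(1 : Nat) = 0), if_pos rfl, if_pos hnl]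
        rw [b0, b1]
      · -- still inside the line comment: both write a space at i
        have e1 : aLine cs res i = aLine cs (res.set i ' ') (i + 1) := by
          rw [aLine, dif_pos ⟨hi, hnl⟩]
        rw [e1]
        have ih' := ih (i + 1) 1 false (res.set i ' ') (by simp; omega) (by simp [hlen])
          (by rw [set_drop_succ]; exact drop_mono_succ hdrop) (by simp)
        have ih2 : aMain cs (aLine cs (res.set i ' ') (i + 1)).1 (aLine cs (res.set i ' ') (i + 1)).2
            = (res.set i ' ').take (i + 1) ++ bRun cs (i + 1) 1 false := by
          simpa [Acorr] using ih'
        rw [ih2, set_take_snoc res i ' ' (by omega)]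
        have b1 : bRun cs i 1 false = ' ' :: bRun cs (i + 1) 1 false := by
          rw [bRun, dif_pos hi, if_neg (by decide : ¬(1 : Nat) = 0), if_pos rfl, if_neg hnl]
        rw [b1]
        simp
    -- ===== state 2 : BLOCK COMMENT =====
    · have he : esc = false := by
        cases esc with
        | false => rfl
        | true => exact (hesc rfl (Or.inr (Or.inr rfl))).elim
      subst he
      have hm' : 2 * (cs.length + 1 - i) < m + 1 := by simpa using hm
      have hA : Acorr cs res i 2 false
          = aMain cs (spaceRange cs res i (aBlockScan cs i)) (aBlockScan cs i) := by
        simp [Acorr]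
      rw [hA]
      by_cases hmt : cs.getD i ' ' = '*' ∧ i + 1 < cs.length ∧ cs.getD (i + 1) ' ' = '/'
      · -- '*/' closes the block comment
        have eJ : aBlockScan cs i = i + 2 := by
          rw [aBlockScan, if_pos hmt.2.1, if_pos ⟨hmt.1, hmt.2.2⟩]
        have s1 : spaceRange cs res i (i + 2) = spaceRange cs (res.set i ' ') (i + 1) (i + 2) := by
          rw [spaceRange, if_pos (by omega), if_neg (by rw [hmt.1]; decide)]
        have s2 : spaceRange cs (res.set i ' ') (i + 1) (i + 2)
            = spaceRange cs ((res.set i ' ').set (i + 1) ' ') (i + 2) (i + 2) := by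
          rw [spaceRange, if_pos (by omega), if_neg (by rw [hmt.2.2]; decide)]
        have s3 : spaceRange cs ((res.set i ' ').set (i + 1) ' ') (i + 2) (i + 2)
            = (res.set i ' ').set (i + 1) ' ' := by
          rw [spaceRange, if_neg (by omega)]
        have hlen2 : ((res.set i ' ').set (i + 1) ' ').length = cs.length := by simp [hlen]
        have hdrop2 : ((res.set i ' ').set (i + 1) ' ').drop (i + 2) = cs.drop (i + 2) := by
          have d1 : ((res.set i ' ').set (i + 1) ' ').drop (i + 2) = (res.set i ' ').drop (i + 2) := by
            rw [List.drop_set_of_lt]; omega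
          have d2 : (res.set i ' ').drop (i + 2) = res.drop (i + 2) := by
            rw [List.drop_set_of_lt]; omega
          rw [d1, d2]; exact drop_mono_succ (drop_mono_succ hdrop)
        have ih' := ih (i + 2) 0 false ((res.set i ' ').set (i + 1) ' ')
          (by simp; omega) hlen2 hdrop2 (by simp)
        have ih2 : aMain cs ((res.set i ' ').set (i + 1) ' ') (i + 2)
            = ((res.set i ' ').set (i + 1) ' ').take (i + 2) ++ bRun cs (i + 2) 0 false := by
          simpa [Acorr] using ih'
        rw [eJ, s1, s2, s3, ih2]
        have t2 : ((res.set i ' ').set (i + 1) ' ').take (i + 2)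
            = (res.set i ' ').take (i + 1) ++ [' '] :=
          set_take_snoc _ (i + 1) ' ' (by simp [hlen]; omega)
        have t1 : (res.set i ' ').take (i + 1) = res.take i ++ [' '] :=
          set_take_snoc _ i ' ' (by omega)
        have b1 : bRun cs i 2 false = ' ' :: ' ' :: bRun cs (i + 2) 0 false := by
          rw [bRun, dif_pos hi, if_neg (by decide : ¬(2 : Nat) = 0), if_neg (by decide : ¬(2 : Nat) = 1), if_pos rfl, if_pos ⟨hmt.1, hmt.2.1, hmt.2.2⟩]
        rw [t2, t1, b1]
        simp
      · by_cases hi1 : i + 1 < cs.length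
        · -- still inside the block comment
          have hnm : ¬(cs.getD i ' ' = '*' ∧ cs.getD (i + 1) ' ' = '/') := fun h => hmt ⟨h.1, hi1, h.2⟩
          have eJ : aBlockScan cs i = aBlockScan cs (i + 1) := by
            rw [aBlockScan, if_pos hi1, if_neg hnm]
          have hJ := aBlockScan_ge cs (i + 1) (by omega)
          have n1 : ¬(cs.getD i ' ' = '*' ∧ i + 1 < cs.length ∧ cs.getD (i + 1) ' ' = '/') :=
            fun h => hnm ⟨h.1, h.2.2⟩
          rw [eJ]
          by_cases hnl : cs.getD i ' ' = '\n'
          · have s1 : spaceRange cs res i (aBlockScan cs (i + 1))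
                = spaceRange cs res (i + 1) (aBlockScan cs (i + 1)) := by
              rw [spaceRange, if_pos (by omega), if_pos hnl]
            have ih' := ih (i + 1) 2 false res (by simp; omega) hlen (drop_mono_succ hdrop) (by simp)
            have ih2 : aMain cs (spaceRange cs res (i + 1) (aBlockScan cs (i + 1))) (aBlockScan cs (i + 1))
                = res.take (i + 1) ++ bRun cs (i + 1) 2 false := by
              simpa [Acorr] using ih'
            rw [s1, ih2, take_snoc_of_drop hlen hdrop hi]
            have b1 : bRun cs i 2 false = cs.getD i ' ' :: bRun cs (i + 1) 2 false := by
              rw [bRun, dif_pos hi, if_neg (by decide : ¬(2 : Nat) = 0), if_neg (by decide : ¬(2 : Nat) = 1), if_pos rfl, if_neg n1, if_pos hnl]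
            rw [b1]
            simp
          · have s1 : spaceRange cs res i (aBlockScan cs (i + 1))
                = spaceRange cs (res.set i ' ') (i + 1) (aBlockScan cs (i + 1)) := by
              rw [spaceRange, if_pos (by omega), if_neg hnl]
            have ih' := ih (i + 1) 2 false (res.set i ' ') (by simp; omega) (by simp [hlen])
              (by rw [set_drop_succ]; exact drop_mono_succ hdrop) (by simp)
            have ih2 : aMain cs (spaceRange cs (res.set i ' ') (i + 1) (aBlockScan cs (i + 1)))
                (aBlockScan cs (i + 1))
                = (res.set i ' ').take (i + 1) ++ bRun cs (i + 1) 2 false := by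
              simpa [Acorr] using ih'
            rw [s1, ih2, set_take_snoc res i ' ' (by omega)]
            have b1 : bRun cs i 2 false = ' ' :: bRun cs (i + 1) 2 false := by
              rw [bRun, dif_pos hi, if_neg (by decide : ¬(2 : Nat) = 0), if_neg (by decide : ¬(2 : Nat) = 1), if_pos rfl, if_neg n1, if_neg hnl]
            rw [b1]
            simp
        · -- i is the last index inside an unterminated block comment
          have eJ : aBlockScan cs i = cs.length := by rw [aBlockScan, if_neg hi1]
          have n1 : ¬(cs.getD i ' ' = '*' ∧ i + 1 < cs.length ∧ cs.getD (i + 1) ' ' = '/') :=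
            fun h => hi1 h.2.1
          rw [eJ]
          by_cases hnl : cs.getD i ' ' = '\n'
          · have s1 : spaceRange cs res i cs.length = spaceRange cs res (i + 1) cs.length := by
              rw [spaceRange, if_pos (by omega), if_pos hnl]
            have s2 : spaceRange cs res (i + 1) cs.length = res := by
              rw [spaceRange, if_neg (by omega)]
            have b1 : bRun cs i 2 false = [cs.getD i ' '] := by
              have hst : bRun cs (i + 1) 2 false = [] := by rw [bRun, dif_neg (by omega)]
              rw [bRun, dif_pos hi, if_neg (by decide : ¬(2 : Nat) = 0), if_neg (by decide : ¬(2 : Nat) = 1), if_pos rfl, if_neg n1, if_pos hnl, hst]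
            rw [s1, s2, aMain, dif_neg (by omega), b1, ← take_snoc_of_drop hlen hdrop hi,
              List.take_of_length_le (by omega)]
          · have s1 : spaceRange cs res i cs.length = spaceRange cs (res.set i ' ') (i + 1) cs.length := by
              rw [spaceRange, if_pos (by omega), if_neg hnl]
            have s2 : spaceRange cs (res.set i ' ') (i + 1) cs.length = res.set i ' ' := by
              rw [spaceRange, if_neg (by omega)]
            have b1 : bRun cs i 2 false = [' '] := by
              have hst : bRun cs (i + 1) 2 false = [] := by rw [bRun, dif_neg (by omega)]
              rw [bRun, dif_pos hi, if_neg (by decide : ¬(2 : Nat) = 0), if_neg (by decide : ¬(2 : Nat) = 1), if_pos rfl, if_neg n1, if_neg hnl, hst]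
            rw [s1, s2, aMain, dif_neg (by omega), b1, ← set_take_snoc res i ' ' (by omega),
              List.take_of_length_le (by simp [hlen]; omega)]
    -- ===== state ≥ 3 : STRING LITERAL =====
    · have h0 : st + 3 ≠ 0 := by omega
      have h1 : st + 3 ≠ 1 := by omega
      have h2 : st + 3 ≠ 2 := by omega
      have hm' : 2 * (cs.length + 1 - i) < m + 1 := by simpa [h1] using hm
      cases esc with
      | true =>
        -- escaped position: A has already skipped it; B copies the char and clears the flag
        have hA : Acorr cs res i (st + 3) true = aMain cs res (aStringSkip cs (i + 1)) := by
          simp [Acorr, h0, h1, h2]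
        have ih' := ih (i + 1) (st + 3) false res (by simp [h1]; omega) hlen
          (drop_mono_succ hdrop) (by simp)
        have ih2 : aMain cs res (aStringSkip cs (i + 1))
            = res.take (i + 1) ++ bRun cs (i + 1) (st + 3) false := by
          simpa [Acorr, h0, h1, h2] using ih'
        rw [hA, ih2, take_snoc_of_drop hlen hdrop hi]
        have b1 : bRun cs i (st + 3) true = cs.getD i ' ' :: bRun cs (i + 1) (st + 3) false := by
          rw [bRun, dif_pos hi, if_neg h0, if_neg h1, if_neg h2, if_pos rfl]
        rw [b1]
        simp
      | false =>
        have hA : Acorr cs res i (st + 3) false = aMain cs res (aStringSkip cs i) := by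
          simp [Acorr, h0, h1, h2]
        rw [hA]
        by_cases hq : cs.getD i ' ' = '"'
        · -- closing quote
          have eS : aStringSkip cs i = i + 1 := by rw [aStringSkip, dif_neg (fun h => h.2 hq)]
          have ih' := ih (i + 1) 0 false res (by simp [h1]; omega) hlen
            (drop_mono_succ hdrop) (by simp)
          have ih2 : aMain cs res (i + 1) = res.take (i + 1) ++ bRun cs (i + 1) 0 false := by
            simpa [Acorr] using ih'
          rw [eS, ih2, take_snoc_of_drop hlen hdrop hi]
          have b1 : bRun cs i (st + 3) false = cs.getD i ' ' :: bRun cs (i + 1) 0 false := by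
            have hnb : cs.getD i ' ' ≠ '\\' := by rw [hq]; decide
            rw [bRun, dif_pos hi, if_neg h0, if_neg h1, if_neg h2, if_neg (by decide : ¬false = true), if_neg hnb, if_pos hq]
          rw [b1]
          simp
        · by_cases hb : cs.getD i ' ' = '\\'
          · -- backslash: next char is escaped
            have eS : aStringSkip cs i = aStringSkip cs (i + 2) := by
              rw [aStringSkip, dif_pos ⟨hi, hq⟩, if_pos hb]
            have ih' := ih (i + 1) (st + 3) true res (by simp [h1]; omega) hlen
              (drop_mono_succ hdrop) (fun _ => by omega)
            have ih2 : aMain cs res (aStringSkip cs (i + 2))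
                = res.take (i + 1) ++ bRun cs (i + 1) (st + 3) true := by
              simpa [Acorr, h0, h1, h2] using ih'
            rw [eS, ih2, take_snoc_of_drop hlen hdrop hi]
            have b1 : bRun cs i (st + 3) false = cs.getD i ' ' :: bRun cs (i + 1) (st + 3) true := by
              rw [bRun, dif_pos hi, if_neg h0, if_neg h1, if_neg h2, if_neg (by decide : ¬false = true), if_pos hb]
            rw [b1]
            simp
          · -- ordinary string character
            have eS : aStringSkip cs i = aStringSkip cs (i + 1) := by
              rw [aStringSkip, dif_pos ⟨hi, hq⟩, if_neg hb]
            have ih' := ih (i + 1) (st + 3) false res (by simp [h1]; omega) hlen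
              (drop_mono_succ hdrop) (by simp)
            have ih2 : aMain cs res (aStringSkip cs (i + 1))
                = res.take (i + 1) ++ bRun cs (i + 1) (st + 3) false := by
              simpa [Acorr, h0, h1, h2] using ih'
            rw [eS, ih2, take_snoc_of_drop hlen hdrop hi]
            have b1 : bRun cs i (st + 3) false = cs.getD i ' ' :: bRun cs (i + 1) (st + 3) false := by
              rw [bRun, dif_pos hi, if_neg h0, if_neg h1, if_neg h2, if_neg (by decide : ¬false = true), if_neg hb, if_neg hq]
            rw [b1]
            simp

-- ===== VERDICT (by name: the statement is the Claim_ definition above) =====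
theorem strip_comments_spec : Claim_equal_strip_comments := by
  intro content _
  unfold Spec_strip_comments strip_comments strip_comments_alt
  have h := mega content.toList (2 * (content.toList.length + 1) + 2) 0 0 false content.toList
    (by simp) rfl rfl (by simp)
  simp [Acorr] at h
  rw [h]
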